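-- pv_equiv track=rewrite | github.com/naydichev/advent-of-code-solutions | 2020/21/puzzle2.py | determine_allergens
-- ===== SOURCE A (Python) =====
-- from collections import defaultdict, namedtuple
--
-- def determine_allergens(possibles):
--     candidates = defaultdict(set)
--
--     for allergen, ingredients in possibles.items():
--         for ingredient in ingredients:
--             candidates[ingredient].add(allergen)
--
--     allergens = dict()
--
--     while len(allergens) < len(possibles):
--         for ingredient, allergen in filter(lambda x: len(x[1]) == 1, candidates.items()):
--             allergen = allergen.pop()
--             if ingredient in allergens:
--                 continue
--             allergens[ingredient] = allergen
--
--             for v in candidates.values():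
--                 if allergen in v:
--                     v.remove(allergen)
--
--     return allergens
-- ===== SOURCE B (Python) =====
-- def determine_allergens(possibles):
--     # One immutable candidate map plus a growing 'used' set: instead of mutating
--     # per-ingredient sets and scanning every set after each assignment, keep for
--     # each ingredient its original candidate list (first-seen order, no
--     # duplicates) and recompute the still-possible allergens by filtering
--     # against the set of already-used allergens.
--     cand = {}
--     for allergen, ingredients in possibles.items():
--         for ing in ingredients:
--             lst = cand.setdefault(ing, [])
--             if allergen not in lst:
--                 lst.append(allergen)
--     assigned = {}
--     used = set()
--     total = len(possibles)
--     while len(assigned) < total: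
--         for ing, allergens_list in cand.items():
--             remaining = [a for a in allergens_list if a not in used]
--             if len(remaining) == 1:
--                 assigned[ing] = remaining[0]
--                 used.add(remaining[0])
--     return assigned
-- ===== Notes on version B (the rewrite author's own statement) =====
-- stated objective: alternative
-- what changed: A mutates a set of still-possible allergens per ingredient and, after each assignment, scans every set to remove the assigned allergen; B keeps one immutable candidate list per ingredient plus a single growing set of used allergens and recomputes the still-possible allergens by filtering against it, so candidate state is never mutated and the per-assignment scan over all sets disappears.
import Mathlib
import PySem

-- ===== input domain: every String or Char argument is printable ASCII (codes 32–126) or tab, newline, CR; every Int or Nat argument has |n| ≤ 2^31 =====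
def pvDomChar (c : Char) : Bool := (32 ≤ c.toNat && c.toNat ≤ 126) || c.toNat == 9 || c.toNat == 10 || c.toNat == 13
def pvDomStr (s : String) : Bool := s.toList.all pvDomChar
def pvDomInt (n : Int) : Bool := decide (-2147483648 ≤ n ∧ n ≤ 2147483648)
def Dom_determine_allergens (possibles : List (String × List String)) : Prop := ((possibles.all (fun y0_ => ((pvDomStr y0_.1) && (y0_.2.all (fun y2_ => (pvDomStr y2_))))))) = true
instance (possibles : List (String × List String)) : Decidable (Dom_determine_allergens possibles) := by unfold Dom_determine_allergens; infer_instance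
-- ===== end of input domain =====

-- B replaces A's mutable per-ingredient sets (and the scan over every set after each
-- assignment) by one immutable candidate map plus a growing set of used allergens;
-- same pass order, different maintained state (objective: alternative).

-- ===== PORT A =====
-- for v in candidates.values(): if allergen in v: v.remove(allergen)
def pvRemoveAll (cands : PySem.Dict String (PySem.Set String)) (a : String) :
    PySem.Dict String (PySem.Set String) :=
  PySem.Dict.mk (cands.items.map (fun p =>
    (p.1, if PySem.Set.contains p.2 a then PySem.Set.discard p.2 a else p.2)))

-- one traversal of `filter(lambda x: len(x[1]) == 1, candidates.items())`: the lazy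
-- filter sees each set as it is WHEN REACHED, so the port walks the (never-changing)
-- key list and looks the current set up at each step
def pvPassA (kys : List String)
    (st : PySem.Dict String (PySem.Set String) × PySem.Dict String String) :
    PySem.Dict String (PySem.Set String) × PySem.Dict String String :=
  kys.foldl (fun st ing =>
    let s := st.1.getD ing PySem.Set.empty
    if s.length == 1 then
      -- allergen = allergen.pop(): on a singleton set, pop returns its unique
      -- element (deterministic, no hash order involved) and empties the set
      let a := s.headI
      let cands := st.1.insert ing (PySem.Set.discard s a)
      if st.2.contains ing then (cands, st.2)
      else (pvRemoveAll cands a, st.2.insert ing a)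
    else st) st

-- while len(allergens) < len(possibles): whenever the Python loop terminates it runs at
-- most n passes (each pass assigns at least one allergen), so n+1 fuel is never
-- exhausted there; where the Python loop runs forever, no return value is claimed
def pvLoopA (n : Nat) (kys : List String) :
    Nat → PySem.Dict String (PySem.Set String) × PySem.Dict String String →
    PySem.Dict String (PySem.Set String) × PySem.Dict String String
  | 0, st => st
  | fuel + 1, st => if st.2.size < n then pvLoopA n kys fuel (pvPassA kys st) else st

def determine_allergens (possibles : List (String × List String)) : List (String × String) :=
  let candidates : PySem.Dict String (PySem.Set String) :=
    possibles.foldl (fun d p =>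
      p.2.foldl (fun d ing =>
        d.insert ing (PySem.Set.add (d.getD ing PySem.Set.empty) p.1)) d)
      PySem.Dict.empty
  (pvLoopA possibles.length candidates.keys (possibles.length + 1)
    (candidates, PySem.Dict.empty)).2.items

-- ===== PORT B =====
def pvPassB (candItems : List (String × List String))
    (st : PySem.Dict String String × PySem.Set String) :
    PySem.Dict String String × PySem.Set String :=
  candItems.foldl (fun st p =>
    let remaining := p.2.filter (fun a => !(PySem.Set.contains st.2 a))
    if remaining.length == 1 then
      (st.1.insert p.1 remaining.headI, PySem.Set.add st.2 remaining.headI)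
    else st) st

def pvLoopB (n : Nat) (candItems : List (String × List String)) :
    Nat → PySem.Dict String String × PySem.Set String →
    PySem.Dict String String × PySem.Set String
  | 0, st => st
  | fuel + 1, st => if st.1.size < n then pvLoopB n candItems fuel (pvPassB candItems st) else st

def determine_allergens_alt (possibles : List (String × List String)) : List (String × String) :=
  let cand : PySem.Dict String (List String) :=
    possibles.foldl (fun d p =>
      p.2.foldl (fun d ing =>
        let d' := d.setdefault ing []
        let lst := d'.getD ing []
        if p.1 ∈ lst then d' else d'.insert ing (lst ++ [p.1])) d)
      PySem.Dict.empty
  (pvLoopB possibles.length cand.items (possibles.length + 1)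
    (PySem.Dict.empty, PySem.Set.empty)).1.items

-- ===== PRECONDITION & SPEC =====
def Spec_determine_allergens (possibles : List (String × List String)) (out : List (String × String)) : Prop := out = determine_allergens_alt possibles
instance (possibles : List (String × List String)) (out : List (String × String)) : Decidable (Spec_determine_allergens possibles out) := by unfold Spec_determine_allergens; infer_instance

-- ===== CLAIM (what is proved, stated in full; the proofs are below) =====
def Claim_equal_determine_allergens : Prop := ∀ (possibles : List (String × List String)), Dom_determine_allergens possibles → Spec_determine_allergens possibles (determine_allergens possibles)

-- ===== LEMMAS AND PROOFS =====

theorem pv_cond_discard (v : List String) (a : String) :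
    (if PySem.Set.contains v a then PySem.Set.discard v a else v) = v.filter (fun y => !(y == a)) := by
  by_cases h : PySem.Set.contains v a
  · rw [if_pos h]; rfl
  · simp only [h, Bool.false_eq_true, not_false_eq_true, if_neg]
    symm
    rw [List.filter_eq_self]
    intro x hx
    simp only [PySem.Set.contains, List.contains_eq_mem, decide_eq_true_eq] at h
    simp only [Bool.not_eq_eq_eq_not, Bool.not_true, beq_eq_false_iff_ne, ne_eq]
    rintro rfl; exact h hx

theorem pv_contains_add (used : PySem.Set String) (a0 x : String) :
    PySem.Set.contains (PySem.Set.add used a0) x = (PySem.Set.contains used x || x == a0) := by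
  simp only [PySem.Set.add, PySem.Set.contains, List.contains_eq_mem] at *
  by_cases h : a0 ∈ used <;> by_cases hx : x = a0 <;> subst_eqs <;> simp_all

theorem pv_filter_subset_nil (L : List String) (p q : String → Bool)
    (himp : ∀ x ∈ L, p x = true → q x = true) (h : L.filter (fun x => !(p x)) = []) :
    L.filter (fun x => !(q x)) = [] := by
  rw [List.filter_eq_nil_iff] at *
  intro x hx
  have hp := h x hx
  simp only [Bool.not_eq_eq_eq_not, Bool.not_true] at hp ⊢
  simp only [Bool.not_eq_false] at hp
  simp [himp x hx hp]

theorem pv_foldl2 {α σ τ : Type _} (R : σ → τ → Prop) (f : σ → α → σ) (g : τ → α → τ) :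
    ∀ (l : List α) (s : σ) (t : τ),
      (∀ s t x, x ∈ l → R s t → R (f s x) (g t x)) → R s t → R (l.foldl f s) (l.foldl g t)
  | [], s, t, _, h => h
  | x :: l, s, t, hstep, h => by
    simp only [List.foldl_cons]
    exact pv_foldl2 R f g l (f s x) (g t x)
      (fun s t y hy hR => hstep s t y (List.mem_cons_of_mem _ hy) hR)
      (hstep s t x (List.mem_cons_self) h)

theorem pv_foldl_pres {α σ : Type _} (P : σ → Prop) (f : σ → α → σ)
    (hf : ∀ s x, P s → P (f s x)) : ∀ (l : List α) (s : σ), P s → P (l.foldl f s)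
  | [], s, h => h
  | x :: l, s, h => by
    simp only [List.foldl_cons]
    exact pv_foldl_pres P f hf l (f s x) (hf s x h)

theorem pv_find_removeAll (a k : String) :
    ∀ (l : List (String × PySem.Set String)),
      (Option.map (fun x => x.2) (List.find? (fun p => p.1 == k)
          (l.map (fun p => (p.1, if PySem.Set.contains p.2 a then PySem.Set.discard p.2 a else p.2))))).getD []
        = ((Option.map (fun x => x.2) (List.find? (fun p => p.1 == k) l)).getD []).filter (fun y => !(y == a))
  | [] => rfl
  | p :: l => by
    by_cases hp : p.1 == k
    · simp only [List.map_cons, List.find?_cons, hp, Option.map_some, Option.getD_some]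
      simpa using pv_cond_discard p.2 a
    · simp only [List.map_cons, List.find?_cons, hp]
      exact pv_find_removeAll a k l

theorem pv_getD_removeAll (d : PySem.Dict String (PySem.Set String)) (a k : String) :
    (pvRemoveAll d a).getD k PySem.Set.empty
      = (d.getD k PySem.Set.empty).filter (fun y => !(y == a)) := by
  simpa [pvRemoveAll, PySem.Dict.getD, PySem.Dict.get?, PySem.Set.empty] using
    pv_find_removeAll a k d.items

-- the bridge invariant: A's mutable state is determined by B's immutable map + used set
def pvInv (cand : PySem.Dict String (List String))
    (stA : PySem.Dict String (PySem.Set String) × PySem.Dict String String)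
    (stB : PySem.Dict String String × PySem.Set String) : Prop :=
  stA.2 = stB.1 ∧
  (∀ ing, stA.1.getD ing PySem.Set.empty
      = (cand.getD ing []).filter (fun a => !(PySem.Set.contains stB.2 a))) ∧
  (∀ ing, stB.1.contains ing = true →
      (cand.getD ing []).filter (fun a => !(PySem.Set.contains stB.2 a)) = [])

theorem pv_step (cand : PySem.Dict String (List String)) (ing : String) (L : List String)
    (hL : cand.get? ing = some L)
    (stA : PySem.Dict String (PySem.Set String) × PySem.Dict String String)
    (stB : PySem.Dict String String × PySem.Set String)
    (h : pvInv cand stA stB) :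
    pvInv cand
      (let s := stA.1.getD ing PySem.Set.empty
       if s.length == 1 then
         let a := s.headI
         let cands := stA.1.insert ing (PySem.Set.discard s a)
         if stA.2.contains ing then (cands, stA.2)
         else (pvRemoveAll cands a, stA.2.insert ing a)
       else stA)
      (let remaining := L.filter (fun a => !(PySem.Set.contains stB.2 a))
       if remaining.length == 1 then
         (stB.1.insert ing remaining.headI, PySem.Set.add stB.2 remaining.headI)
       else stB) := by
  obtain ⟨hAlg, hC, hDead⟩ := h
  have hgd : cand.getD ing [] = L := by simp [PySem.Dict.getD, hL]
  have hs : stA.1.getD ing PySem.Set.empty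
      = L.filter (fun a => !(PySem.Set.contains stB.2 a)) := by rw [hC ing, hgd]
  dsimp only
  rw [hs]
  by_cases hlen : ((L.filter (fun a => !(PySem.Set.contains stB.2 a))).length == 1)
  · rw [if_pos hlen, if_pos hlen]
    have hlen1 : (L.filter (fun a => !(PySem.Set.contains stB.2 a))).length = 1 := by
      simpa using hlen
    obtain ⟨a0, ha0⟩ := List.length_eq_one_iff.mp hlen1
    have hhead : (L.filter (fun a => !(PySem.Set.contains stB.2 a))).headI = a0 := by
      rw [ha0]; rfl
    have hmem_r : ∀ x ∈ L, PySem.Set.contains stB.2 x = false → x = a0 := by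
      intro x hx hfx
      have : x ∈ L.filter (fun a => !(PySem.Set.contains stB.2 a)) :=
        List.mem_filter.mpr ⟨hx, by simp only [hfx, Bool.not_false]⟩
      rw [ha0] at this
      simpa using this
    have hnil : ∀ k, cand.getD k [] = L →
        (cand.getD k []).filter (fun a => !(PySem.Set.contains (PySem.Set.add stB.2 a0) a)) = [] := by
      intro k hk
      rw [hk, List.filter_eq_nil_iff]
      intro x hx
      rw [pv_contains_add]
      rcases hfx : PySem.Set.contains stB.2 x with _ | _
      · have := hmem_r x hx hfx
        subst this
        simp
      · simp
    have hcont : stB.1.contains ing = false := by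
      rcases hcont' : stB.1.contains ing with _ | _
      · rfl
      · exfalso
        have := hDead ing hcont'
        rw [hgd, ha0] at this
        cases this
    rw [hhead, hAlg, hcont]
    simp only [Bool.false_eq_true, if_false]
    refine ⟨rfl, ?_, ?_⟩
    · intro k
      rw [pv_getD_removeAll, PySem.Dict.getD_insert]
      by_cases hk : k = ing
      · subst hk
        rw [if_pos rfl, ha0, hnil k (by rw [hgd])]
        simp [PySem.Set.discard]
      · rw [if_neg hk, hC k, List.filter_filter]
        apply List.filter_congr
        intro x _
        rw [pv_contains_add, Bool.not_or, Bool.and_comm]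
    · intro k hk
      rw [PySem.Dict.contains_insert] at hk
      rcases hk' : (k == ing) with _ | _
      · rw [hk', Bool.false_or] at hk
        have hold := hDead k hk
        exact pv_filter_subset_nil _ _ _
          (fun x _ hx => by rw [pv_contains_add, hx, Bool.true_or]) hold
      · have : k = ing := by simpa using hk'
        subst this
        exact hnil k (by rw [hgd])
  · rw [if_neg hlen, if_neg hlen]
    exact ⟨hAlg, hC, hDead⟩

theorem pv_pass (cand : PySem.Dict String (List String)) :
    ∀ (items : List (String × List String)),
      (∀ p ∈ items, cand.get? p.1 = some p.2) →
      ∀ stA stB, pvInv cand stA stB →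
      pvInv cand (pvPassA (items.map Prod.fst) stA) (pvPassB items stB)
  | [], _, stA, stB, h => h
  | (ing, L) :: items, hmem, stA, stB, h => by
    simp only [pvPassA, pvPassB, List.map_cons, List.foldl_cons] at *
    exact pv_pass cand items (fun p hp => hmem p (List.mem_cons_of_mem _ hp)) _ _
      (pv_step cand ing L (hmem (ing, L) List.mem_cons_self) stA stB h)

theorem pv_loop (n : Nat) (cand : PySem.Dict String (List String))
    (items : List (String × List String)) (hitems : items = cand.items)
    (hmem : ∀ p ∈ items, cand.get? p.1 = some p.2) :
    ∀ (fuel : Nat) stA stB, pvInv cand stA stB →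
      pvInv cand (pvLoopA n (items.map Prod.fst) fuel stA) (pvLoopB n items fuel stB)
  | 0, stA, stB, h => h
  | fuel + 1, stA, stB, h => by
    simp only [pvLoopA, pvLoopB]
    have hsz : stA.2.size = stB.1.size := by rw [h.1]
    rw [hsz]
    by_cases hc : stB.1.size < n
    · rw [if_pos hc, if_pos hc]
      exact pv_loop n cand items hitems hmem fuel _ _ (pv_pass cand items hmem stA stB h)
    · rw [if_neg hc, if_neg hc]; exact h

def pvBEq (d1 : PySem.Dict String (PySem.Set String)) (d2 : PySem.Dict String (List String)) : Prop :=
  (∀ ing, d1.getD ing PySem.Set.empty = d2.getD ing []) ∧ d1.keys = d2.keys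

theorem pv_build_step (d1 : PySem.Dict String (PySem.Set String))
    (d2 : PySem.Dict String (List String)) (h : pvBEq d1 d2) (al ing : String) :
    pvBEq (d1.insert ing (PySem.Set.add (d1.getD ing PySem.Set.empty) al))
      (let d' := d2.setdefault ing []
       let lst := d'.getD ing []
       if al ∈ lst then d' else d'.insert ing (lst ++ [al])) := by
  obtain ⟨hg, hk⟩ := h
  have hcc : d1.contains ing = d2.contains ing := by
    rw [PySem.Dict.contains_eq_decide_mem_keys, PySem.Dict.contains_eq_decide_mem_keys, hk]
  dsimp only
  by_cases hc2 : d2.contains ing = true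
  · rw [PySem.Dict.setdefault_of_contains _ _ hc2]
    have hlst : d2.getD ing [] = d1.getD ing PySem.Set.empty := (hg ing).symm
    by_cases hal : al ∈ d2.getD ing []
    · rw [if_pos hal]
      have : PySem.Set.add (d1.getD ing PySem.Set.empty) al = d1.getD ing PySem.Set.empty :=
        PySem.Set.add_of_mem (by rw [hlst] at hal; exact hal)
      rw [this]
      refine ⟨?_, by rw [PySem.Dict.keys_insert_of_contains _ _ (by rw [hcc]; exact hc2), hk]⟩
      intro k
      rw [PySem.Dict.getD_insert]
      by_cases hkk : k = ing
      · subst hkk; rw [if_pos rfl, hg k]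
      · rw [if_neg hkk, hg k]
    · rw [if_neg hal]
      have : PySem.Set.add (d1.getD ing PySem.Set.empty) al
          = d2.getD ing [] ++ [al] :=  by
        rw [PySem.Set.add_of_not_mem (by rw [hlst] at hal; exact hal), hg ing]
      rw [this]
      refine ⟨?_, ?_⟩
      · intro k
        rw [PySem.Dict.getD_insert, PySem.Dict.getD_insert]
        by_cases hkk : k = ing
        · subst hkk; rw [if_pos rfl, if_pos rfl]
        · rw [if_neg hkk, if_neg hkk, hg k]
      · rw [PySem.Dict.keys_insert_of_contains _ _ (by rw [hcc]; exact hc2),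
          PySem.Dict.keys_insert_of_contains _ _ hc2, hk]
  · have hc2' : d2.contains ing = false := by simpa using hc2
    have hc1' : d1.contains ing = false := by rw [hcc]; exact hc2'
    rw [PySem.Dict.setdefault_of_not_contains _ _ hc2', PySem.Dict.getD_insert_self]
    rw [if_neg (List.not_mem_nil), PySem.Dict.insert_insert_self, List.nil_append]
    have : PySem.Set.add (d1.getD ing PySem.Set.empty) al = [al] := by
      rw [PySem.Dict.getD_of_not_contains _ _ hc1']
      rfl
    rw [this]
    refine ⟨?_, ?_⟩
    · intro k
      rw [PySem.Dict.getD_insert, PySem.Dict.getD_insert]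
      by_cases hkk : k = ing
      · subst hkk; rw [if_pos rfl, if_pos rfl]
      · rw [if_neg hkk, if_neg hkk, hg k]
    · rw [PySem.Dict.keys_insert_of_not_contains _ _ hc1',
        PySem.Dict.keys_insert_of_not_contains _ _ hc2', hk]

theorem pv_build (possibles : List (String × List String)) :
    pvBEq
      (possibles.foldl (fun d p =>
        p.2.foldl (fun d ing =>
          d.insert ing (PySem.Set.add (d.getD ing PySem.Set.empty) p.1)) d)
        PySem.Dict.empty)
      (possibles.foldl (fun d p =>
        p.2.foldl (fun d ing =>
          let d' := d.setdefault ing []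
          let lst := d'.getD ing []
          if p.1 ∈ lst then d' else d'.insert ing (lst ++ [p.1])) d)
        PySem.Dict.empty) := by
  refine pv_foldl2 pvBEq _ _ possibles PySem.Dict.empty PySem.Dict.empty ?_ ?_
  · intro s t p _ hR
    exact pv_foldl2 pvBEq _ _ p.2 s t
      (fun s t ing _ hR => pv_build_step s t hR p.1 ing) hR
  · refine ⟨fun ing => ?_, rfl⟩
    rw [PySem.Dict.getD_empty, PySem.Dict.getD_empty]
    rfl

theorem pv_buildA_nodup (possibles : List (String × List String)) :
    (possibles.foldl (fun d p =>
        p.2.foldl (fun d ing =>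
          d.insert ing (PySem.Set.add (d.getD ing PySem.Set.empty) p.1)) d)
        PySem.Dict.empty).keys.Nodup := by
  refine pv_foldl_pres (fun (d : PySem.Dict String (PySem.Set String)) => d.keys.Nodup)
    _ ?_ possibles PySem.Dict.empty PySem.Dict.nodup_keys_empty
  intro s p hs
  exact pv_foldl_pres (fun d => d.keys.Nodup) _
    (fun s ing hs => PySem.Dict.nodup_keys_insert _ _ _ hs) p.2 s hs

-- ===== VERDICT (by name: the statement is the Claim_ definition above) =====
theorem determine_allergens_spec : Claim_equal_determine_allergens := by
  unfold Claim_equal_determine_allergens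
  intro possibles _
  unfold Spec_determine_allergens determine_allergens determine_allergens_alt
  dsimp only
  have hB := pv_build possibles
  have hnod : (possibles.foldl (fun d p =>
      p.2.foldl (fun d ing =>
        let d' := d.setdefault ing []
        let lst := d'.getD ing []
        if p.1 ∈ lst then d' else d'.insert ing (lst ++ [p.1])) d)
      PySem.Dict.empty).keys.Nodup := by
    rw [← hB.2]
    exact pv_buildA_nodup possibles
  set cand := possibles.foldl (fun d p =>
      p.2.foldl (fun d ing =>
        let d' := d.setdefault ing []
        let lst := d'.getD ing []
        if p.1 ∈ lst then d' else d'.insert ing (lst ++ [p.1])) d)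
      PySem.Dict.empty with hcand
  set candA := possibles.foldl (fun d p =>
      p.2.foldl (fun d ing =>
        d.insert ing (PySem.Set.add (d.getD ing PySem.Set.empty) p.1)) d)
      PySem.Dict.empty with hcandA
  have hmem : ∀ p ∈ cand.items, cand.get? p.1 = some p.2 := by
    intro p hp
    exact PySem.Dict.get?_of_mem_items cand (k := p.1) (v := p.2) hp hnod
  have hkeys : candA.keys = cand.items.map Prod.fst := hB.2
  have hinit : pvInv cand (candA, PySem.Dict.empty) (PySem.Dict.empty, PySem.Set.empty) := by
    refine ⟨rfl, fun ing => ?_, fun ing h => ?_⟩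
    · rw [hB.1 ing]
      symm
      rw [List.filter_eq_self]
      intro x _
      rfl
    · rw [PySem.Dict.contains_empty] at h
      cases h
  have hloop := pv_loop possibles.length cand cand.items rfl hmem
    (possibles.length + 1) (candA, PySem.Dict.empty) (PySem.Dict.empty, PySem.Set.empty) hinit
  rw [hkeys]
  rw [hloop.1]
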